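-- pv_equiv track=rewrite | github.com/thekkanathashish95/hippomem | hippomem/encoder/updater.py | _truncate_facts
-- ===== SOURCE A (Python) =====
-- from typing import Callable, Dict, Any, List, Optional, Set, Tuple, TYPE_CHECKING
--
-- def _truncate_facts(facts: List[str], max_chars: int = 3000, max_fact_chars: int = 300) -> str:
--     """
--     Join facts into a preview string.
--     Each individual fact is truncated to max_fact_chars (with '...').
--     Stops adding facts once the total would exceed max_chars.
--     """
--     if not facts:
--         return "no prior facts"
--     parts: List[str] = []
--     total = 0
--     for fact in facts:
--         truncated = fact if len(fact) <= max_fact_chars else fact[:max_fact_chars - 3] + "..."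
--         if total and total + len(truncated) + 2 > max_chars:
--             break
--         parts.append(truncated)
--         total += len(truncated) + 2  # +2 for "; " separator
--     return "; ".join(parts)
-- ===== SOURCE B (Python) =====
-- def _truncate_facts(facts, max_chars=3000, max_fact_chars=300):
--     # Two-pass decomposition: truncate all facts, build cumulative weighted
--     # lengths, find the cutoff index, join the kept prefix.
--     if not facts:
--         return "no prior facts"
--     truncs = [f if len(f) <= max_fact_chars else f[:max_fact_chars - 3] + "..."
--               for f in facts]
--     totals = []
--     running = 0
--     for t in truncs:
--         running += len(t) + 2  # +2 for "; " separator
--         totals.append(running)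
--     keep = 1  # the first fact is always kept
--     for total in totals[1:]:
--         if total > max_chars:
--             break
--         keep += 1
--     return "; ".join(truncs[:keep])
-- ===== Notes on version B (the rewrite author's own statement) =====
-- stated objective: alternative
-- what changed: Replaces A's single interleaved loop with running total and break by a three-stage pipeline: map every fact to its truncated form, compute the list of cumulative weighted lengths, determine the cutoff index from that list, and join the kept prefix.
import Mathlib
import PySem

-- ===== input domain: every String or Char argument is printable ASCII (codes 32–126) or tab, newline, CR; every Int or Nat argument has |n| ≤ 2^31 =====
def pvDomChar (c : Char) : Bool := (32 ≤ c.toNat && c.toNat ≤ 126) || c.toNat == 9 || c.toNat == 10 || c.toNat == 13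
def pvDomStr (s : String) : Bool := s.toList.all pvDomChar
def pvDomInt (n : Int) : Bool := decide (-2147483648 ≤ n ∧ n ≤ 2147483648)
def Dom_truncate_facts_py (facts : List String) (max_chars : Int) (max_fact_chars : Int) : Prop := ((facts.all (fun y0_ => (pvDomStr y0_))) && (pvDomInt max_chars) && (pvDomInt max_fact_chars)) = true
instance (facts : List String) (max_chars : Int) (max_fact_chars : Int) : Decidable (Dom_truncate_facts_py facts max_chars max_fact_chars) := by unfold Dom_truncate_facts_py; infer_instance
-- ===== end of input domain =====

-- B replaces A's single interleaved loop (running total + break) by a three-stage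
-- pipeline (truncate all facts, cumulative weighted lengths, cutoff index, join
-- the kept prefix); same cost, proved to return the same string (objective: alternative).


-- ===== PORT A =====
-- 'truncated = fact if len(fact) <= max_fact_chars else fact[:max_fact_chars-3] + "..."'
def pvTruncA (max_fact_chars : Int) (fact : String) : String :=
  if PySem.Str.len fact ≤ max_fact_chars then fact
  else PySem.Str.slice fact none (some (max_fact_chars - 3)) ++ "..."

-- the for loop of A: state = (parts, total); break leaves the loop
def pvLoopA (max_chars max_fact_chars : Int) :
    List String → List String → Int → List String
  | [], parts, _ => parts
  | fact :: rest, parts, total =>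
    let truncated := pvTruncA max_fact_chars fact
    if total ≠ 0 ∧ total + PySem.Str.len truncated + 2 > max_chars then parts
    else pvLoopA max_chars max_fact_chars rest (parts ++ [truncated])
           (total + PySem.Str.len truncated + 2)

def truncate_facts_py (facts : List String) (max_chars : Int) (max_fact_chars : Int) : String :=
  if facts = [] then "no prior facts"
  else PySem.Str.join "; " (pvLoopA max_chars max_fact_chars facts [] 0)

-- ===== PORT B =====
-- comprehension: each fact mapped to its truncated form
def pvTruncB (max_fact_chars : Int) (fact : String) : String :=
  if PySem.Str.len fact ≤ max_fact_chars then fact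
  else PySem.Str.slice fact none (some (max_fact_chars - 3)) ++ "..."

-- cumulative weighted lengths ('totals' list, running sum)
def pvAccum (running : Int) : List String → List Int
  | [] => []
  | t :: rest => (running + PySem.Str.len t + 2) :: pvAccum (running + PySem.Str.len t + 2) rest

-- cutoff index: 'keep' counter scanning totals[1:]
def pvKeep (max_chars : Int) : List Int → Nat → Nat
  | [], keep => keep
  | total :: rest, keep => if total > max_chars then keep else pvKeep max_chars rest (keep + 1)

def truncate_facts_py_alt (facts : List String) (max_chars : Int) (max_fact_chars : Int) : String :=
  if facts = [] then "no prior facts"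
  else
    let truncs := facts.map (pvTruncB max_fact_chars)
    let totals := pvAccum 0 truncs
    let keep := pvKeep max_chars (totals.drop 1) 1
    PySem.Str.join "; " (truncs.take keep)

-- ===== PRECONDITION & SPEC =====
def Spec_truncate_facts_py (facts : List String) (max_chars : Int) (max_fact_chars : Int) (out : String) : Prop := out = truncate_facts_py_alt facts max_chars max_fact_chars
instance (facts : List String) (max_chars : Int) (max_fact_chars : Int) (out : String) : Decidable (Spec_truncate_facts_py facts max_chars max_fact_chars out) := by unfold Spec_truncate_facts_py; infer_instance

-- ===== CLAIM (what is proved, stated in full; the proofs are below) =====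
def Claim_equal_truncate_facts_py : Prop := ∀ (facts : List String) (max_chars : Int) (max_fact_chars : Int), Dom_truncate_facts_py facts max_chars max_fact_chars → Spec_truncate_facts_py facts max_chars max_fact_chars (truncate_facts_py facts max_chars max_fact_chars)

-- ===== LEMMAS AND PROOFS =====
theorem pvTruncA_eq_B (mfc : Int) (f : String) : pvTruncA mfc f = pvTruncB mfc f := rfl

theorem pvKeep_shift (mc : Int) (ts : List Int) (k : Nat) :
    pvKeep mc ts k = k + pvKeep mc ts 0 := by
  induction ts generalizing k with
  | nil => simp [pvKeep]
  | cons t rest ih =>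
    simp only [pvKeep]
    split_ifs with h
    · simp
    · rw [ih (k + 1), ih 1]; omega

-- main loop invariant: once total > 0, A's loop appends exactly the prefix of the
-- truncated tail whose cumulative totals stay ≤ max_chars
theorem pvLoopA_eq (mc mfc : Int) (l : List String) (parts : List String) (total : Int)
    (h : 0 < total) :
    pvLoopA mc mfc l parts total =
      parts ++ (l.map (pvTruncB mfc)).take
        (pvKeep mc (pvAccum total (l.map (pvTruncB mfc))) 0) := by
  induction l generalizing parts total with
  | nil => simp [pvLoopA, pvAccum, pvKeep]
  | cons f rest ih =>
    simp only [pvLoopA, List.map_cons, pvAccum, pvTruncA_eq_B]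
    by_cases hb : total + PySem.Str.len (pvTruncB mfc f) + 2 > mc
    · rw [if_pos ⟨by omega, hb⟩]
      have hb' : ¬ ((total + ((pvTruncB mfc f).length : Int) + 2) ≤ mc) := by
        simpa [PySem.Str.len_eq] using hb
      simp [pvKeep, hb']
    · rw [if_neg (by tauto)]
      have hlen : 0 ≤ PySem.Str.len (pvTruncB mfc f) := by
        simp [PySem.Str.len_eq]
      rw [ih _ _ (by omega)]
      simp only [pvKeep, if_neg hb, pvKeep_shift mc _ 1]
      rw [Nat.add_comm, List.take_succ_cons]
      simp

-- ===== VERDICT (by name: the statement is the Claim_ definition above) =====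
theorem truncate_facts_py_spec : Claim_equal_truncate_facts_py := by
  intro facts mc mfc _
  unfold Spec_truncate_facts_py truncate_facts_py truncate_facts_py_alt
  cases facts with
  | nil => simp
  | cons f rest =>
    simp only [reduceCtorEq, if_false]
    congr 1
    have hlen : 0 ≤ PySem.Str.len (pvTruncB mfc f) := by simp [PySem.Str.len_eq]
    simp only [pvLoopA, List.map_cons, pvAccum, pvTruncA_eq_B]
    rw [if_neg (by simp)]
    rw [pvLoopA_eq _ _ _ _ _ (by omega)]
    simp only [List.drop_succ_cons, List.drop_zero, pvKeep_shift mc _ 1]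
    simp
    rw [Nat.add_comm 1, List.take_succ_cons]
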